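-- pv_equiv track=rewrite | github.com/alibaba/ChatLearn | chatlearn/runtime/decorator.py | split_along_batch
-- ===== SOURCE A (Python) =====
-- def split_along_batch(batch, new_batch_size):
--     assert isinstance(batch, (list, tuple, dict)), \
--         "batch type {} is not supported".format(type(batch))
--     if isinstance(batch, (list, tuple)):
--         bs = len(batch[0])
--         keys = range(len(batch))
--     else:
--         bs = len(next(iter(batch.values())))
--         keys = batch.keys()
--
--     accum_bs = 0
--     new_batches = []
--     while accum_bs < bs:
--         if isinstance(batch, (list, tuple)):
--             new_batch = [batch[key][accum_bs:min(accum_bs + new_batch_size, bs)] for key in keys]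
--         else:
--             new_batch = {key: batch[key][accum_bs:min(accum_bs + new_batch_size, bs)] for key in keys}
--         accum_bs += new_batch_size
--         new_batches.append(new_batch)
--     return new_batches
-- ===== SOURCE B (Python) =====
-- def split_along_batch(batch, new_batch_size):
--     assert isinstance(batch, (list, tuple, dict)), \
--         "batch type {} is not supported".format(type(batch))
--     is_seq = isinstance(batch, (list, tuple))
--     keys = list(range(len(batch))) if is_seq else list(batch.keys())
--     bs = len(batch[keys[0]])
--     if bs == 0:
--         return []
--     # per-key column of slices, computed once per key
--     chunks = {key: [batch[key][i:min(i + new_batch_size, bs)]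
--                     for i in range(0, bs, new_batch_size)]
--               for key in keys}
--     num_chunks = len(chunks[keys[0]])
--     if is_seq:
--         return [[chunks[key][j] for key in keys] for j in range(num_chunks)]
--     return [{key: chunks[key][j] for key in keys} for j in range(num_chunks)]
-- ===== Notes on version B (the rewrite author's own statement) =====
-- stated objective: alternative
-- what changed: B transposes A's loop nesting: instead of a while-loop that builds each sub-batch by slicing every key per iteration, B precomputes each key's full list of chunk slices once (a per-key column table) and then assembles the j-th sub-batch by reading column j of every key.
import Mathlib
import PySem

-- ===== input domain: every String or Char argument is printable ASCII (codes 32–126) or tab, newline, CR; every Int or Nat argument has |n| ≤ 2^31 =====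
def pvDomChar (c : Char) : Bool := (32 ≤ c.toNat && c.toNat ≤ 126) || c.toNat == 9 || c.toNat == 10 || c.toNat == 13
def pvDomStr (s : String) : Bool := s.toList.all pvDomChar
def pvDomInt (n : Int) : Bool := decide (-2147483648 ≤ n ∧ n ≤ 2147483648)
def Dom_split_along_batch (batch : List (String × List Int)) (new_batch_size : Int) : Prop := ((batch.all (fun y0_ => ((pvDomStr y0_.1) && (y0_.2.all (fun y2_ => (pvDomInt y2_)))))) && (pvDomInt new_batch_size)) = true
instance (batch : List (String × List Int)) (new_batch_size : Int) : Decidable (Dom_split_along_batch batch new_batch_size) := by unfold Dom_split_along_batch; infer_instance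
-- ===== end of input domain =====

-- B transposes A's per-chunk-then-per-key while-loop into a per-key chunk-column table
-- assembled per chunk index; same cost, different decomposition (objective: alternative).

-- ===== PORT A =====
-- the while-loop of A: 'while accum_bs < bs: new_batch = {key: batch[key][accum_bs:min(accum_bs+nbs, bs)]}; accum_bs += nbs'
-- (fuel only makes the loop total in Lean; with Pre_ it is large enough to never cut the loop short)
def splitLoopA (batch : List (String × List Int)) (nbs bs : Int) (accum : Int) (fuel : Nat) :
    List (List (String × List Int)) :=
  match fuel with
  | 0 => []
  | fuel + 1 =>
    if accum < bs then
      (batch.map (fun kv => (kv.1, PySem.List.slice kv.2 (some accum) (some (min (accum + nbs) bs)))))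
        :: splitLoopA batch nbs bs (accum + nbs) fuel
    else []

def split_along_batch (batch : List (String × List Int)) (new_batch_size : Int) :
    List (List (String × List Int)) :=
  -- bs = len(next(iter(batch.values()))); raises StopIteration on an empty dict (excluded by Pre_)
  let bs : Int := match batch.head? with | some kv => (kv.2.length : Int) | none => 0
  splitLoopA batch new_batch_size bs 0 bs.toNat

-- ===== PORT B =====
-- chunks = {key: [batch[key][i:min(i+nbs, bs)] for i in range(0, bs, nbs)] for key in keys}
def chunksB (batch : List (String × List Int)) (nbs bs : Int) : List (String × List (List Int)) :=
  batch.map (fun kv =>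
    (kv.1, (PySem.List.pyRange 0 bs nbs).map
      (fun i => PySem.List.slice kv.2 (some i) (some (min (i + nbs) bs)))))

def split_along_batch_alt (batch : List (String × List Int)) (new_batch_size : Int) :
    List (List (String × List Int)) :=
  match batch with
  | [] => []  -- keys[0] raises IndexError on an empty dict (excluded by Pre_)
  | (_, v0) :: _ =>
    let bs : Int := (v0.length : Int)
    if bs = 0 then []
    else
      let chunks := chunksB batch new_batch_size bs
      let num_chunks := (chunks.headD ("", [])).2.length
      (List.range num_chunks).map (fun j => chunks.map (fun kc => (kc.1, kc.2.getD j [])))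

-- ===== PRECONDITION & SPEC =====
-- Pre_ excludes the empty dict (A raises StopIteration) and new_batch_size ≤ 0 with a nonempty
-- first value (A's while-loop never terminates); everything else A returns on is admitted.
def Pre_split_along_batch (batch : List (String × List Int)) (new_batch_size : Int) : Prop :=
  batch ≠ [] ∧ (1 ≤ new_batch_size ∨ (batch.headD ("", [])).2 = [])
instance (batch : List (String × List Int)) (new_batch_size : Int) : Decidable (Pre_split_along_batch batch new_batch_size) := by unfold Pre_split_along_batch; infer_instance

def pvWitness_split_along_batch : (List (String × List Int)) × Int := ([("a", [1, 2, 3]), ("b", [4, 5, 6])], 2)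

def Spec_split_along_batch (batch : List (String × List Int)) (new_batch_size : Int) (out : List (List (String × List Int))) : Prop := out = split_along_batch_alt batch new_batch_size
instance (batch : List (String × List Int)) (new_batch_size : Int) (out : List (List (String × List Int))) : Decidable (Spec_split_along_batch batch new_batch_size out) := by unfold Spec_split_along_batch; infer_instance

-- ===== CLAIM (what is proved, stated in full; the proofs are below) =====
def Claim_equal_split_along_batch : Prop := ∀ (batch : List (String × List Int)) (new_batch_size : Int), Dom_split_along_batch batch new_batch_size → Pre_split_along_batch batch new_batch_size → Spec_split_along_batch batch new_batch_size (split_along_batch batch new_batch_size)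

-- ===== LEMMAS AND PROOFS =====

-- the common chunk-at-start-index function both sides compute
def chunkAt (batch : List (String × List Int)) (nbs bs i : Int) : List (String × List Int) :=
  batch.map (fun kv => (kv.1, PySem.List.slice kv.2 (some i) (some (min (i + nbs) bs))))

theorem pyRange_pos_nil {a b s : Int} (hs : 0 < s) (h : b ≤ a) :
    PySem.List.pyRange a b s = [] := by
  rw [PySem.List.pyRange_of_pos a b hs]
  simp [show ¬ a < b by omega]

theorem pyRange_pos_cons {a b s : Int} (hs : 0 < s) (h : a < b) :
    PySem.List.pyRange a b s = a :: PySem.List.pyRange (a + s) b s := by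
  rw [PySem.List.pyRange_of_pos a b hs, PySem.List.pyRange_of_pos (a + s) b hs]
  have hkey : (if a < b then ((b - a + s - 1) / s).toNat else 0)
      = (if a + s < b then ((b - (a + s) + s - 1) / s).toNat else 0) + 1 := by
    rw [if_pos h]
    by_cases h2 : a + s < b
    · rw [if_pos h2]
      have : b - a + s - 1 = (b - (a + s) + s - 1) + 1 * s := by ring
      rw [this, Int.add_mul_ediv_right _ _ (by omega : s ≠ 0)]
      have hpos : 0 ≤ b - (a + s) + s - 1 := by omega
      have : 0 ≤ (b - (a + s) + s - 1) / s := Int.ediv_nonneg hpos (by omega)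
      omega
    · rw [if_neg h2]
      have : b - a + s - 1 = (b - a - 1) + 1 * s := by ring
      rw [this, Int.add_mul_ediv_right _ _ (by omega : s ≠ 0)]
      have : (b - a - 1) / s = 0 := Int.ediv_eq_zero_of_lt (by omega) (by omega)
      omega
  rw [hkey, List.range_succ_eq_map]
  simp only [List.map_cons, List.map_map]
  congr 1
  · simp
  · apply List.map_congr_left
    intro k _
    simp only [Function.comp]
    push_cast
    ring

theorem splitLoopA_eq (batch : List (String × List Int)) (nbs bs : Int) (hn : 0 < nbs) :
    ∀ (fuel : Nat) (accum : Int), (bs - accum).toNat ≤ fuel →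
      splitLoopA batch nbs bs accum fuel
        = (PySem.List.pyRange accum bs nbs).map (chunkAt batch nbs bs) := by
  intro fuel
  induction fuel with
  | zero =>
    intro accum hf
    rw [pyRange_pos_nil hn (by omega)]
    rfl
  | succ fuel ih =>
    intro accum hf
    by_cases h : accum < bs
    · rw [splitLoopA, if_pos h, pyRange_pos_cons hn h, List.map_cons,
        ih (accum + nbs) (by omega)]
      rfl
    · rw [splitLoopA, if_neg h, pyRange_pos_nil hn (by omega)]
      simp

theorem headD_chunksB (k0 : String) (v0 : List Int) (rest : List (String × List Int)) (nbs bs : Int) :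
    ((chunksB ((k0, v0) :: rest) nbs bs).headD ("", [])).2.length
      = (PySem.List.pyRange 0 bs nbs).length := by
  simp [chunksB]

theorem alt_eq_map_chunkAt (k0 : String) (v0 : List Int) (rest : List (String × List Int))
    (nbs : Int) (hbs : ¬ ((v0.length : Int) = 0)) :
    split_along_batch_alt ((k0, v0) :: rest) nbs
      = (PySem.List.pyRange 0 (v0.length : Int) nbs).map (chunkAt ((k0, v0) :: rest) nbs (v0.length : Int)) := by
  have h1 : split_along_batch_alt ((k0, v0) :: rest) nbs
      = (List.range ((chunksB ((k0, v0) :: rest) nbs (v0.length : Int)).headD ("", [])).2.length).map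
          (fun j => (chunksB ((k0, v0) :: rest) nbs (v0.length : Int)).map
            (fun kc => (kc.1, kc.2.getD j []))) := by
    simp only [split_along_batch_alt, if_neg hbs]
  rw [h1, headD_chunksB]
  apply List.ext_getElem
  · simp
  · intro j hj1 hj2
    have hjlt : j < (PySem.List.pyRange 0 (v0.length : Int) nbs).length := by simpa using hj1
    simp only [List.getElem_map, List.getElem_range, chunksB, List.map_map, chunkAt]
    apply List.map_congr_left
    intro kv _
    simp only [Function.comp]
    rw [List.getD_eq_getElem?_getD, List.getElem?_map, List.getElem?_eq_getElem hjlt]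
    rfl

-- ===== VERDICT (by name: the statement is the Claim_ definition above) =====
theorem split_along_batch_spec : Claim_equal_split_along_batch := by
  intro batch nbs _ hpre
  obtain ⟨hne, hcase⟩ := hpre
  unfold Spec_split_along_batch
  match batch, hne with
  | (k0, v0) :: rest, _ =>
    rcases hcase with hn | hv0
    · by_cases hbs : (v0.length : Int) = 0
      · have hv0 : v0 = [] := by
          have := hbs; simpa using this
        subst hv0
        simp [split_along_batch, split_along_batch_alt, splitLoopA]
      · rw [alt_eq_map_chunkAt k0 v0 rest nbs hbs]
        show splitLoopA ((k0, v0) :: rest) nbs (v0.length : Int) 0 (Int.toNat (v0.length : Int)) = _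
        rw [splitLoopA_eq ((k0, v0) :: rest) nbs (v0.length : Int) (by omega) _ 0 (by omega)]
    · have : v0 = [] := by simpa using hv0
      subst this
      simp [split_along_batch, split_along_batch_alt, splitLoopA]
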